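-- pv_equiv track=rewrite | github.com/AntoniLuongPham/Python-Programming | STEAM-for-VietNam/202101-CS101/Lesson-4/Checkpoint-3.py | get_first_applicants
-- ===== SOURCE A (Python) =====
-- def get_first_applicants(applicants):
--     first_applicants = {}
--     for data in applicants:
--         name = data[0]
--         city = data[1]
--         if (city in first_applicants) is False:
--             first_applicants[city] = name
--     return first_applicants
-- ===== SOURCE B (Python) =====
-- def get_first_applicants(applicants):
--     names = [data[0] for data in applicants]
--     cities = [data[1] for data in applicants]
--     return {city: names[cities.index(city)] for city in dict.fromkeys(cities)}
-- ===== Notes on version B (the rewrite author's own statement) =====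
-- stated objective: alternative
-- what changed: Replaces the guarded single-pass dict build with a two-phase column construction: project the name and city columns, dedup the cities with dict.fromkeys, and build the result by a dict comprehension that fetches each city's name via its first index.
import Mathlib
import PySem

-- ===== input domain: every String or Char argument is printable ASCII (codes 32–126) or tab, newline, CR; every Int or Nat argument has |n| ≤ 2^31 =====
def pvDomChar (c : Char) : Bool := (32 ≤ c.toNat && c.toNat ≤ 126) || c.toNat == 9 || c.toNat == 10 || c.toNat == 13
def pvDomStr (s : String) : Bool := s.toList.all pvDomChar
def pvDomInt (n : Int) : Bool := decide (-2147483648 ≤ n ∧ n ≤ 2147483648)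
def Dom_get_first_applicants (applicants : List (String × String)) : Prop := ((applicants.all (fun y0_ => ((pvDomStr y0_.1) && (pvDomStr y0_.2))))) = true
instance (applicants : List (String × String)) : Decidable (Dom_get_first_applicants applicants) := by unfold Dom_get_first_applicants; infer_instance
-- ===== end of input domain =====

-- B builds the dict in two phases (dedup the city column, then first-index name lookup) instead of A's guarded single-pass insert; alternative decomposition, same return value.


-- ===== PORT A =====
def get_first_applicants (applicants : List (String × String)) : List (String × String) :=
  (applicants.foldl (fun first_applicants data =>
      let name := data.1
      let city := data.2
      if (PySem.Dict.contains first_applicants city) = false then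
        PySem.Dict.insert first_applicants city name
      else first_applicants)
    PySem.Dict.empty).items

-- ===== PORT B =====
def get_first_applicants_alt (applicants : List (String × String)) : List (String × String) :=
  let names := applicants.map (fun data => data.1)
  let cities := applicants.map (fun data => data.2)
  -- dict.fromkeys(cities) iterated for its keys is PySem.List.dedup cities;
  -- names[cities.index(city)] : index always succeeds (city ∈ cities), so the .elim "" branch is unreachable
  ((PySem.List.dedup cities).foldl (fun d city =>
      PySem.Dict.insert d city
        ((PySem.List.index? cities city).elim "" (fun i => PySem.List.pyGetD names (i : Int) "")))
    PySem.Dict.empty).items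

-- ===== PRECONDITION & SPEC =====
def Spec_get_first_applicants (applicants : List (String × String)) (out : List (String × String)) : Prop := out = get_first_applicants_alt applicants
instance (applicants : List (String × String)) (out : List (String × String)) : Decidable (Spec_get_first_applicants applicants out) := by unfold Spec_get_first_applicants; infer_instance

-- ===== CLAIM (what is proved, stated in full; the proofs are below) =====
def Claim_equal_get_first_applicants : Prop := ∀ (applicants : List (String × String)), Dom_get_first_applicants applicants → Spec_get_first_applicants applicants (get_first_applicants applicants)

-- ===== LEMMAS AND PROOFS =====

/-- Reference recursion for A's loop: first (city, name) pairs, skipping cities already seen. -/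
def gFirst : List (String × String) → List String → List (String × String)
  | [], _ => []
  | (n, c) :: rest, seen =>
      if c ∈ seen then gFirst rest seen else (c, n) :: gFirst rest (seen ++ [c])

/-- Cities of `l` not in `seen`, first occurrences in order. -/
def newFirsts : List String → List String → List String
  | [], _ => []
  | c :: cs, seen =>
      if c ∈ seen then newFirsts cs seen else c :: newFirsts cs (seen ++ [c])

/-- B's value function. -/
def fVal (xs : List (String × String)) (c : String) : String :=
  (PySem.List.index? (xs.map (fun d => d.2)) c).elim ""
    (fun i => PySem.List.pyGetD (xs.map (fun d => d.1)) (i : Int) "")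

theorem mem_newFirsts {c : String} : ∀ (l seen : List String),
    c ∈ newFirsts l seen → c ∈ l ∧ c ∉ seen := by
  intro l
  induction l with
  | nil => intro seen h; simp [newFirsts] at h
  | cons x xs ih =>
      intro seen h
      simp only [newFirsts] at h
      by_cases hx : x ∈ seen
      · simp [hx] at h
        rcases ih seen h with ⟨h1, h2⟩
        exact ⟨List.mem_cons_of_mem _ h1, h2⟩
      · simp [hx] at h
        rcases h with rfl | h
        · exact ⟨List.mem_cons_self .., hx⟩
        · rcases ih _ h with ⟨h1, h2⟩
          simp at h2
          exact ⟨List.mem_cons_of_mem _ h1, h2.1⟩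

theorem fVal_cons {n c c' : String} {rest : List (String × String)}
    (hne : c' ≠ c) (hmem : c' ∈ rest.map (fun d => d.2)) :
    fVal ((n, c) :: rest) c' = fVal rest c' := by
  unfold fVal
  rw [show ((n, c) :: rest).map (fun d => d.2) = c :: rest.map (fun d => d.2) from rfl,
      show ((n, c) :: rest).map (fun d => d.1) = n :: rest.map (fun d => d.1) from rfl,
      PySem.List.index?_cons_of_ne _ (fun h => hne h.symm)]
  rcases (PySem.List.index?_isSome_iff (xs := rest.map (fun d => d.2)) (v := c')).mpr hmem
    |> Option.isSome_iff_exists.mp with ⟨i, hi⟩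
  rw [hi]
  simp only [Option.map_some, Option.elim_some]
  rw [PySem.List.pyGetD_natCast, PySem.List.pyGetD_natCast]
  rfl

theorem gFirst_eq_map : ∀ (xs : List (String × String)) (seen : List String),
    gFirst xs seen = (newFirsts (xs.map (fun d => d.2)) seen).map (fun c => (c, fVal xs c)) := by
  intro xs
  induction xs with
  | nil => intro seen; rfl
  | cons p rest ih =>
      obtain ⟨n, c⟩ := p
      intro seen
      have hmap : ((n, c) :: rest).map (fun d => d.2) = c :: rest.map (fun d => d.2) := rfl
      rw [hmap]
      simp only [gFirst, newFirsts]
      by_cases hc : c ∈ seen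
      · simp only [hc, if_true, ih]
        apply List.map_congr_left
        intro c' hc'
        rcases mem_newFirsts _ _ hc' with ⟨h1, h2⟩
        have hne : c' ≠ c := fun h => h2 (h ▸ hc)
        rw [fVal_cons hne h1]
      · simp only [hc, if_false, ih]
        rw [List.map_cons]
        congr 1
        · have : fVal ((n, c) :: rest) c = n := by
            unfold fVal
            rw [hmap, PySem.List.index?_cons_self]
            simp only [Option.elim_some, Nat.cast_zero]
            rw [show ((n, c) :: rest).map (fun d => d.1) = n :: rest.map (fun d => d.1) from rfl,
                PySem.List.pyGetD_ofNat']
            rfl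
          rw [this]
        · apply List.map_congr_left
          intro c' hc'
          rcases mem_newFirsts _ _ hc' with ⟨h1, h2⟩
          simp at h2
          rw [fVal_cons h2.2 h1]

theorem foldl_add_eq_newFirsts : ∀ (l seen : List String),
    l.foldl PySem.Set.add seen = seen ++ newFirsts l seen := by
  intro l
  induction l with
  | nil => intro seen; simp [newFirsts]
  | cons c cs ih =>
      intro seen
      simp only [List.foldl_cons, newFirsts]
      by_cases hc : c ∈ seen
      · rw [PySem.Set.add_of_mem hc, ih, if_pos hc]
      · rw [PySem.Set.add_of_not_mem hc, ih, if_neg hc, List.append_assoc]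
        rfl

theorem foldA_items : ∀ (xs : List (String × String)) (d : PySem.Dict String String),
    d.keys.Nodup →
    (xs.foldl (fun first_applicants data =>
        if (PySem.Dict.contains first_applicants data.2) = false then
          PySem.Dict.insert first_applicants data.2 data.1
        else first_applicants) d).items = d.items ++ gFirst xs d.keys := by
  intro xs
  induction xs with
  | nil => intro d _; simp [gFirst]
  | cons p rest ih =>
      obtain ⟨n, c⟩ := p
      intro d hnd
      simp only [List.foldl_cons, gFirst]
      by_cases hc : PySem.Dict.contains d c = true
      · have hmem : c ∈ d.keys := (PySem.Dict.contains_iff_mem_keys d c).mp hc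
        rw [if_neg (by simp [hc]), if_pos hmem]
        exact ih d hnd
      · have hcf : PySem.Dict.contains d c = false := by
          cases h : PySem.Dict.contains d c
          · rfl
          · exact absurd h hc
        have hmem : c ∉ d.keys := fun h => hc ((PySem.Dict.contains_iff_mem_keys d c).mpr h)
        rw [if_pos hcf, if_neg hmem, ih _ (PySem.Dict.nodup_keys_insert d c n hnd)]
        rw [PySem.Dict.items_insert_of_not_contains _ _ hcf,
            PySem.Dict.keys_insert_of_not_contains _ _ hcf,
            List.append_assoc]
        rfl

theorem foldB_items (cities : List String) (f : String → String) :
    ∀ (ks : List String) (d : PySem.Dict String String),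
    ks.Nodup → (∀ k ∈ ks, PySem.Dict.contains d k = false) →
    (ks.foldl (fun d city => PySem.Dict.insert d city (f city)) d).items
      = d.items ++ ks.map (fun k => (k, f k)) := by
  intro ks
  induction ks with
  | nil => intro d _ _; simp
  | cons k ks ih =>
      intro d hnd hcon
      simp only [List.foldl_cons, List.map_cons]
      rw [ih _ (List.Nodup.of_cons hnd) (by
            intro k' hk'
            rw [PySem.Dict.contains_insert]
            have hne : (k' == k) = false := by
              simp only [beq_eq_false_iff_ne, ne_eq]
              intro h; subst h
              exact (List.nodup_cons.mp hnd).1 hk'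
            simp [hne, hcon k' (List.mem_cons_of_mem _ hk')]),
          PySem.Dict.items_insert_of_not_contains _ _ (hcon k (List.mem_cons_self ..)),
          List.append_assoc]
      rfl

-- ===== VERDICT (by name: the statement is the Claim_ definition above) =====
theorem get_first_applicants_spec : Claim_equal_get_first_applicants := by
  intro applicants _
  unfold Spec_get_first_applicants get_first_applicants get_first_applicants_alt
  have hA : (applicants.foldl (fun first_applicants data =>
        if (PySem.Dict.contains first_applicants data.2) = false then
          PySem.Dict.insert first_applicants data.2 data.1
        else first_applicants) PySem.Dict.empty).items
      = gFirst applicants [] := by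
    rw [foldA_items applicants PySem.Dict.empty (by
      rw [show (PySem.Dict.empty : PySem.Dict String String).keys = [] from rfl]
      exact List.nodup_nil)]
    rw [show (PySem.Dict.empty : PySem.Dict String String).items = [] from rfl,
        show (PySem.Dict.empty : PySem.Dict String String).keys = [] from rfl,
        List.nil_append]
  have hdedup : PySem.List.dedup (applicants.map (fun d => d.2))
      = newFirsts (applicants.map (fun d => d.2)) [] := by
    rw [PySem.List.dedup_eq_ofList, PySem.Set.ofList_eq_foldl,
        foldl_add_eq_newFirsts]
    rfl
  have hB := foldB_items (applicants.map (fun d => d.2)) (fVal applicants)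
      (PySem.List.dedup (applicants.map (fun d => d.2))) PySem.Dict.empty
      (by rw [PySem.List.dedup_eq_ofList]; exact PySem.Set.nodup_ofList _)
      (by intro k _; exact PySem.Dict.contains_empty k)
  rw [show (PySem.Dict.empty : PySem.Dict String String).items = [] from rfl,
      List.nil_append] at hB
  rw [hA, gFirst_eq_map applicants [], ← hdedup]
  show _ = (List.foldl (fun d city => PySem.Dict.insert d city (fVal applicants city))
      PySem.Dict.empty (PySem.List.dedup (applicants.map (fun d => d.2)))).items
  rw [hB]
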